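-- pv_equiv track=rewrite | github.com/andreahcruz/266Project | retriever.py | _add_bridge_tables
-- ===== SOURCE A (Python) =====
-- def _add_bridge_tables(
--     selected: set[int],
--     foreign_keys: list[list[int]],
--     columns: list[list],
-- ) -> set[int]:
--     """Add only bridge/junction tables that connect two already-selected tables.
--
--     A bridge table is one that is NOT selected but has FK links to at least
--     two different selected tables. This is much tighter than adding all FK
--     neighbors.
--     """
--     if len(selected) < 2:
--         return set(selected)
--
--     num_tables = max(columns[c][0] for c in range(len(columns)) if columns[c][0] != -1) + 1
--     result = set(selected)
--
--     for candidate in range(num_tables):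
--         if candidate in result:
--             continue
--         # Count how many distinct selected tables this candidate connects to
--         connected_selected = set()
--         for src_idx, dst_idx in foreign_keys:
--             src_tbl = columns[src_idx][0]
--             dst_tbl = columns[dst_idx][0]
--             if src_tbl == candidate and dst_tbl in selected:
--                 connected_selected.add(dst_tbl)
--             elif dst_tbl == candidate and src_tbl in selected:
--                 connected_selected.add(src_tbl)
--         if len(connected_selected) >= 2:
--             result.add(candidate)
--
--     return result
-- ===== SOURCE B (Python) =====
-- def _add_bridge_tables(
--     selected: set[int],
--     foreign_keys: list[list[int]],
--     columns: list[list],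
-- ) -> set[int]:
--     """Single pass over foreign_keys accumulating, for each non-selected
--     candidate table, the set of selected tables it links to; then keep the
--     candidates with >= 2 such neighbors."""
--     if len(selected) < 2:
--         return set(selected)
--
--     num_tables = max(c[0] for c in columns if c[0] != -1) + 1
--
--     neighbors: dict[int, set] = {}
--     for src_idx, dst_idx in foreign_keys:
--         src_tbl = columns[src_idx][0]
--         dst_tbl = columns[dst_idx][0]
--         if dst_tbl in selected and src_tbl not in selected:
--             neighbors.setdefault(src_tbl, set()).add(dst_tbl)
--         if src_tbl in selected and dst_tbl not in selected:
--             neighbors.setdefault(dst_tbl, set()).add(src_tbl)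
--
--     result = set(selected)
--     for cand in sorted(neighbors):
--         if 0 <= cand < num_tables and len(neighbors[cand]) >= 2:
--             result.add(cand)
--     return result
-- ===== Notes on version B (the rewrite author's own statement) =====
-- stated objective: alternative
-- what changed: Instead of scanning all foreign_keys once per candidate table (every table id below num_tables), B makes a single pass over foreign_keys accumulating a dict candidate -> set of selected neighbor tables, then keeps the sorted candidates with >= 2 neighbors.
-- outside the precondition, e.g. on _add_bridge_tables({0, 1}, [[5, 5]], [[0], [1]]): A returns {0, 1}, B raises IndexError
import Mathlib
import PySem

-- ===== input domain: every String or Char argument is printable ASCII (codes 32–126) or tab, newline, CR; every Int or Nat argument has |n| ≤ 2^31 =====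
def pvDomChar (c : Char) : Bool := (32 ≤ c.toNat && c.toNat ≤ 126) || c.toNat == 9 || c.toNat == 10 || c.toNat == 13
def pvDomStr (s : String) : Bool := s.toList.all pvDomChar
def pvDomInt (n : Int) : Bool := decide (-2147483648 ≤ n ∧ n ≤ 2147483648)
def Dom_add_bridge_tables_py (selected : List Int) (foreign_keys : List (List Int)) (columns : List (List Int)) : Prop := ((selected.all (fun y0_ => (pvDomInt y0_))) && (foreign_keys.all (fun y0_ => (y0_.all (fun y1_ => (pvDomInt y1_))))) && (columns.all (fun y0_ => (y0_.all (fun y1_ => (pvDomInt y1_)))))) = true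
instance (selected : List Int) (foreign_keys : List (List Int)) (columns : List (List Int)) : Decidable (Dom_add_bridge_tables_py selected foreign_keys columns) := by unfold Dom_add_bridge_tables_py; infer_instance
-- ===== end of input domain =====

-- B replaces A's per-candidate scan of foreign_keys by a single pass over foreign_keys
-- accumulating a candidate -> selected-neighbors dict, then filtering candidates with >= 2.


-- ===== PORT A =====
-- columns[i][0]  (none = IndexError)
def pvColA (columns : List (List Int)) (i : Int) : Option Int :=
  match PySem.List.pyGet? columns i with
  | none => none
  | some row => PySem.List.pyGet? row 0

-- num_tables = max(columns[c][0] for c in range(len(columns)) if columns[c][0] != -1) + 1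
def pvNumTablesA (columns : List (List Int)) : Option Int :=
  match (PySem.List.pyRange 0 (columns.length : Int) 1).foldl
      (fun acc c =>
        match acc with
        | none => none
        | some l =>
          match PySem.List.pyGet? (PySem.List.pyGetD columns c []) 0 with
          | none => none
          | some h => some (if h ≠ -1 then l ++ [h] else l)) (some []) with
  | none => none
  | some heads =>
    match PySem.List.max? heads (fun x => x) with
    | none => none
    | some m => some (m + 1)

-- the inner 'for src_idx, dst_idx in foreign_keys' loop building connected_selected
def pvConnA (selected : List Int) (foreign_keys : List (List Int)) (columns : List (List Int)) (cand : Int) : Option (PySem.Set Int) :=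
  foreign_keys.foldl
    (fun acc fk =>
      match acc with
      | none => none
      | some cs =>
        match fk with
        | [src_idx, dst_idx] =>
          match pvColA columns src_idx, pvColA columns dst_idx with
          | some src_tbl, some dst_tbl =>
            some (if src_tbl = cand ∧ dst_tbl ∈ selected then PySem.Set.add cs dst_tbl
                  else if dst_tbl = cand ∧ src_tbl ∈ selected then PySem.Set.add cs src_tbl
                  else cs)
          | _, _ => none
        | _ => none) (some PySem.Set.empty)

def add_bridge_tables_pyO (selected : List Int) (foreign_keys : List (List Int)) (columns : List (List Int)) : Option (List Int) :=
  if selected.length < 2 then some (PySem.Set.ofList selected)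
  else
    match pvNumTablesA columns with
    | none => none
    | some num_tables =>
      (PySem.List.pyRange 0 num_tables 1).foldl
        (fun acc cand =>
          match acc with
          | none => none
          | some result =>
            if cand ∈ result then some result
            else
              match pvConnA selected foreign_keys columns cand with
              | none => none
              | some conn => some (if 2 ≤ conn.length then PySem.Set.add result cand else result))
        (some (PySem.Set.ofList selected))

def add_bridge_tables_py (selected : List Int) (foreign_keys : List (List Int)) (columns : List (List Int)) : List Int :=
  (add_bridge_tables_pyO selected foreign_keys columns).getD []

-- ===== PORT B =====
-- columns[i][0]  (none = IndexError)
def pvColB (columns : List (List Int)) (i : Int) : Option Int :=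
  match PySem.List.pyGet? columns i with
  | none => none
  | some row => PySem.List.pyGet? row 0

-- num_tables = max(c[0] for c in columns if c[0] != -1) + 1
def pvNumTablesB (columns : List (List Int)) : Option Int :=
  match columns.foldl
      (fun acc row =>
        match acc with
        | none => none
        | some l =>
          match PySem.List.pyGet? row 0 with
          | none => none
          | some h => some (if h ≠ -1 then l ++ [h] else l)) (some []) with
  | none => none
  | some heads =>
    match PySem.List.max? heads (fun x => x) with
    | none => none
    | some m => some (m + 1)

-- single pass: neighbors[t] = set of selected tables t links to (t not selected)
def pvNeighborsB (selected : List Int) (foreign_keys : List (List Int)) (columns : List (List Int)) : Option (PySem.Dict Int (PySem.Set Int)) :=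
  foreign_keys.foldl
    (fun acc fk =>
      match acc with
      | none => none
      | some nb =>
        match fk with
        | [src_idx, dst_idx] =>
          match pvColB columns src_idx, pvColB columns dst_idx with
          | some src_tbl, some dst_tbl =>
            let nb1 := if dst_tbl ∈ selected ∧ src_tbl ∉ selected
                       then nb.modify src_tbl PySem.Set.empty (fun s => PySem.Set.add s dst_tbl) else nb
            some (if src_tbl ∈ selected ∧ dst_tbl ∉ selected
                  then nb1.modify dst_tbl PySem.Set.empty (fun s => PySem.Set.add s src_tbl) else nb1)
          | _, _ => none
        | _ => none) (some PySem.Dict.empty)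

def add_bridge_tables_py_alt (selected : List Int) (foreign_keys : List (List Int)) (columns : List (List Int)) : List Int :=
  (if selected.length < 2 then some (PySem.Set.ofList selected)
   else
     match pvNumTablesB columns with
     | none => none
     | some num_tables =>
       match pvNeighborsB selected foreign_keys columns with
       | none => none
       | some neighbors =>
         some ((PySem.List.sorted neighbors.keys (fun x => x) false).foldl
           (fun result cand =>
             if 0 ≤ cand ∧ cand < num_tables ∧ 2 ≤ (neighbors.getD cand PySem.Set.empty).length
             then PySem.Set.add result cand else result)
           (PySem.Set.ofList selected))).getD []

-- ===== PRECONDITION & SPEC =====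
-- When |selected| ≥ 2, Python A raises on an empty column row (IndexError), on max() of an
-- empty generator (all heads -1, ValueError), and on a foreign_keys row that is not a pair of
-- valid column indices (ValueError/IndexError). Pre_ excludes exactly those shapes. It is
-- slightly narrower than A's returning set: when A's candidate loop body never runs (e.g. every
-- candidate below num_tables is already selected) A returns without touching foreign_keys,
-- while B always reads them; Pre_ still requires foreign_keys to be well-formed there.
def Pre_add_bridge_tables_py (selected : List Int) (foreign_keys : List (List Int)) (columns : List (List Int)) : Prop :=
  selected.length < 2 ∨
  ((∀ row ∈ columns, row ≠ []) ∧
   (∃ row ∈ columns, row.head? ≠ some (-1)) ∧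
   (∀ fk ∈ foreign_keys, fk.length = 2 ∧ ∀ i ∈ fk, PySem.Raise.InRange columns.length i))

instance (selected : List Int) (foreign_keys : List (List Int)) (columns : List (List Int)) : Decidable (Pre_add_bridge_tables_py selected foreign_keys columns) := by unfold Pre_add_bridge_tables_py; infer_instance

def pvWitness_add_bridge_tables_py : List Int × List (List Int) × List (List Int) :=
  ([0, 1], [[0, 2], [1, 2]], [[0], [1], [2]])

def Spec_add_bridge_tables_py (selected : List Int) (foreign_keys : List (List Int)) (columns : List (List Int)) (out : List Int) : Prop := out = add_bridge_tables_py_alt selected foreign_keys columns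
instance (selected : List Int) (foreign_keys : List (List Int)) (columns : List (List Int)) (out : List Int) : Decidable (Spec_add_bridge_tables_py selected foreign_keys columns out) := by unfold Spec_add_bridge_tables_py; infer_instance

-- ===== CLAIM (what is proved, stated in full; the proofs are below) =====
def Claim_equal_add_bridge_tables_py : Prop := ∀ (selected : List Int) (foreign_keys : List (List Int)) (columns : List (List Int)), Dom_add_bridge_tables_py selected foreign_keys columns → Pre_add_bridge_tables_py selected foreign_keys columns → Spec_add_bridge_tables_py selected foreign_keys columns (add_bridge_tables_py selected foreign_keys columns)

-- ===== LEMMAS AND PROOFS =====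

-- total (proof-side) versions of the folds, valid under Pre_

def pvTblT (columns : List (List Int)) (i : Int) : Int :=
  (pvColA columns i).getD 0

def pvConnStep (selected : List Int) (columns : List (List Int)) (cand : Int)
    (cs : PySem.Set Int) (fk : List Int) : PySem.Set Int :=
  match fk with
  | [s, d] =>
    if pvTblT columns s = cand ∧ pvTblT columns d ∈ selected then PySem.Set.add cs (pvTblT columns d)
    else if pvTblT columns d = cand ∧ pvTblT columns s ∈ selected then PySem.Set.add cs (pvTblT columns s)
    else cs
  | _ => cs

def pvConnT (selected : List Int) (foreign_keys : List (List Int)) (columns : List (List Int)) (cand : Int) : PySem.Set Int :=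
  foreign_keys.foldl (pvConnStep selected columns cand) PySem.Set.empty

def pvNbStep (selected : List Int) (columns : List (List Int))
    (nb : PySem.Dict Int (PySem.Set Int)) (fk : List Int) : PySem.Dict Int (PySem.Set Int) :=
  match fk with
  | [s, d] =>
    let nb1 := if pvTblT columns d ∈ selected ∧ pvTblT columns s ∉ selected
               then nb.modify (pvTblT columns s) PySem.Set.empty (fun t => PySem.Set.add t (pvTblT columns d)) else nb
    if pvTblT columns s ∈ selected ∧ pvTblT columns d ∉ selected
    then nb1.modify (pvTblT columns d) PySem.Set.empty (fun t => PySem.Set.add t (pvTblT columns s)) else nb1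
  | _ => nb

def pvNbT (selected : List Int) (foreign_keys : List (List Int)) (columns : List (List Int)) : PySem.Dict Int (PySem.Set Int) :=
  foreign_keys.foldl (pvNbStep selected columns) PySem.Dict.empty

-- an Option-threaded foldl whose step never fails is the total foldl
theorem foldl_match_some {a b : Type} (F : Option b -> a -> Option b) (g : b -> a -> b)
    (l : List a) (h : ∀ v, ∀ x, x ∈ l -> F (some v) x = some (g v x)) :
    ∀ v : b, l.foldl F (some v) = some (l.foldl g v) := by
  induction l with
  | nil => intro v; rfl
  | cons x t ih =>
    intro v
    simp only [List.foldl_cons]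
    rw [h v x (by simp)]
    exact ih (fun w y hy => h w y (by simp [hy])) (g v x)

theorem pvColA_some (columns : List (List Int)) (i : Int)
    (hrows : ∀ row ∈ columns, row ≠ ([] : List Int))
    (hin : PySem.Raise.InRange columns.length i) :
    pvColA columns i = some (pvTblT columns i) := by
  cases hc : PySem.List.pyGet? columns i with
  | none =>
    rw [PySem.List.pyGet?_eq_none_iff] at hc
    exact absurd hin hc
  | some row =>
    have hrow := hrows row (PySem.List.mem_of_pyGet?_eq_some _ hc)
    cases row with
    | nil => exact absurd rfl hrow
    | cons a t =>
      have h1 : pvColA columns i = some a := by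
        unfold pvColA; rw [hc]; exact PySem.List.pyGet?_zero_cons a t
      rw [h1]; unfold pvTblT; rw [h1]; rfl

theorem numAB (columns : List (List Int)) : pvNumTablesA columns = pvNumTablesB columns := by
  unfold pvNumTablesA pvNumTablesB
  rw [PySem.List.foldl_pyRange_zero_pyGetD' columns []
      (fun acc row =>
        match acc with
        | none => none
        | some l =>
          match PySem.List.pyGet? row 0 with
          | none => none
          | some h => some (if h ≠ -1 then l ++ [h] else l)) (some [])]

theorem numB_some (columns : List (List Int))
    (hrows : ∀ row ∈ columns, row ≠ ([] : List Int))
    (hex : ∃ row ∈ columns, row.head? ≠ some (-1)) :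
    ∃ nT, pvNumTablesB columns = some nT := by
  have hf := foldl_match_some
    (F := fun acc row =>
        match acc with
        | none => none
        | some l =>
          match PySem.List.pyGet? row 0 with
          | none => none
          | some h => some (if h ≠ -1 then l ++ [h] else l))
    (g := fun l row => if row.headD 0 ≠ -1 then l ++ [row.headD 0] else l)
    columns
    (by
      intro v row hrow
      obtain ⟨a, t, rfl⟩ : ∃ a t, row = a :: t := by
        cases row with
        | nil => exact absurd rfl (hrows _ hrow)
        | cons a t => exact ⟨a, t, rfl⟩
      simp)
    []
  have hH : columns.foldl (fun l row => if row.headD 0 ≠ -1 then l ++ [row.headD 0] else l) []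
      = (columns.filter (fun row => decide (row.headD 0 ≠ -1))).map (fun row => row.headD 0) := by
    have := PySem.List.foldl_append_ite (p := fun row : List Int => row.headD 0 ≠ -1)
      (f := fun row : List Int => row.headD 0) columns []
    simpa using this
  have hne : (columns.filter (fun row => decide (row.headD 0 ≠ -1))).map (fun row => row.headD 0) ≠ [] := by
    obtain ⟨r, hr, hrh⟩ := hex
    obtain ⟨a, t, rfl⟩ : ∃ a t, r = a :: t := by
      cases r with
      | nil => exact absurd rfl (hrows _ hr)
      | cons a t => exact ⟨a, t, rfl⟩
    have ha : a ≠ -1 := by simpa using hrh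
    have : (a :: t) ∈ columns.filter (fun row => decide (row.headD 0 ≠ -1)) := by
      rw [List.mem_filter]; exact ⟨hr, by simpa using ha⟩
    intro hnil
    simp only [List.map_eq_nil_iff] at hnil
    rw [hnil] at this
    simp at this
  unfold pvNumTablesB
  rw [hf, hH]
  cases hm : PySem.List.max? ((columns.filter (fun row => decide (row.headD 0 ≠ -1))).map (fun row => row.headD 0)) (fun x => x) with
  | none => exact absurd ((PySem.List.max?_eq_none_iff _ _).1 hm) hne
  | some m => exact ⟨m + 1, by simp only [hm]⟩

theorem connA_some (selected : List Int) (foreign_keys : List (List Int)) (columns : List (List Int)) (cand : Int)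
    (hrows : ∀ row ∈ columns, row ≠ ([] : List Int))
    (hfk : ∀ fk ∈ foreign_keys, fk.length = 2 ∧ ∀ i ∈ fk, PySem.Raise.InRange columns.length i) :
    pvConnA selected foreign_keys columns cand = some (pvConnT selected foreign_keys columns cand) := by
  unfold pvConnA pvConnT
  apply foldl_match_some
  intro cs fk hmem
  obtain ⟨hlen, hin⟩ := hfk fk hmem
  obtain ⟨a, d, rfl⟩ : ∃ a d, fk = [a, d] := by
    match fk, hlen with
    | [a, d], _ => exact ⟨a, d, rfl⟩
  have h1 := pvColA_some columns a hrows (hin a (by simp))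
  have h2 := pvColA_some columns d hrows (hin d (by simp))
  simp only [pvConnStep, h1, h2]

theorem nbB_some (selected : List Int) (foreign_keys : List (List Int)) (columns : List (List Int))
    (hrows : ∀ row ∈ columns, row ≠ ([] : List Int))
    (hfk : ∀ fk ∈ foreign_keys, fk.length = 2 ∧ ∀ i ∈ fk, PySem.Raise.InRange columns.length i) :
    pvNeighborsB selected foreign_keys columns = some (pvNbT selected foreign_keys columns) := by
  unfold pvNeighborsB pvNbT
  apply foldl_match_some
  intro nb fk hmem
  obtain ⟨hlen, hin⟩ := hfk fk hmem
  obtain ⟨a, d, rfl⟩ : ∃ a d, fk = [a, d] := by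
    match fk, hlen with
    | [a, d], _ => exact ⟨a, d, rfl⟩
  have h1 : pvColB columns a = some (pvTblT columns a) := pvColA_some columns a hrows (hin a (by simp))
  have h2 : pvColB columns d = some (pvTblT columns d) := pvColA_some columns d hrows (hin d (by simp))
  simp only [pvNbStep, h1, h2]

-- keys of the neighbors dict are never selected, and are nodup
theorem nbStep_keys (selected : List Int) (columns : List (List Int)) (fk : List Int)
    (nb : PySem.Dict Int (PySem.Set Int))
    (h1 : ∀ k ∈ nb.keys, k ∉ selected) (h2 : nb.keys.Nodup) :
    (∀ k ∈ (pvNbStep selected columns nb fk).keys, k ∉ selected) ∧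
      (pvNbStep selected columns nb fk).keys.Nodup := by
  have key : ∀ (d : PySem.Dict Int (PySem.Set Int)) (ky v : Int),
      ky ∉ selected → (∀ k ∈ d.keys, k ∉ selected) → d.keys.Nodup →
      (∀ k ∈ (d.modify ky PySem.Set.empty (fun t => PySem.Set.add t v)).keys, k ∉ selected) ∧
        (d.modify ky PySem.Set.empty (fun t => PySem.Set.add t v)).keys.Nodup := by
    intro d ky v hky hd1 hd2
    rw [PySem.Dict.keys_modify]
    constructor
    · intro k hk
      rcases (PySem.Dict.mem_keys_insert d ky k _).1 hk with rfl | hk'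
      · exact hky
      · exact hd1 k hk'
    · exact PySem.Dict.nodup_keys_insert d ky _ hd2
  match fk with
  | [] => exact ⟨h1, h2⟩
  | [a] => exact ⟨h1, h2⟩
  | a :: b :: c :: t => exact ⟨h1, h2⟩
  | [a, d] =>
    simp only [pvNbStep]
    split_ifs with c1 c2 c2'
    · exact key _ _ _ c1.2 (key _ _ _ c2.2 h1 h2).1 (key _ _ _ c2.2 h1 h2).2
    · exact key _ _ _ c1.2 h1 h2
    · exact key _ _ _ c2'.2 h1 h2
    · exact ⟨h1, h2⟩

theorem nb_keys_aux (selected : List Int) (columns : List (List Int)) :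
    ∀ (l : List (List Int)) (nb : PySem.Dict Int (PySem.Set Int)),
      (∀ k ∈ nb.keys, k ∉ selected) → nb.keys.Nodup →
      (∀ k ∈ (l.foldl (pvNbStep selected columns) nb).keys, k ∉ selected) ∧
        (l.foldl (pvNbStep selected columns) nb).keys.Nodup := by
  intro l
  induction l with
  | nil => intro nb h1 h2; exact ⟨h1, h2⟩
  | cons fk t ih =>
    intro nb h1 h2
    obtain ⟨g1, g2⟩ := nbStep_keys selected columns fk nb h1 h2
    exact ih _ g1 g2

theorem nb_keys_not_selected (selected : List Int) (foreign_keys : List (List Int)) (columns : List (List Int)) :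
    ∀ k ∈ (pvNbT selected foreign_keys columns).keys, k ∉ selected :=
  (nb_keys_aux selected columns foreign_keys PySem.Dict.empty (by simp [PySem.Dict.keys_empty]) (by simp [PySem.Dict.keys_empty])).1

theorem nb_keys_nodup (selected : List Int) (foreign_keys : List (List Int)) (columns : List (List Int)) :
    (pvNbT selected foreign_keys columns).keys.Nodup :=
  (nb_keys_aux selected columns foreign_keys PySem.Dict.empty (by simp [PySem.Dict.keys_empty]) (by simp [PySem.Dict.keys_empty])).2

-- A's connected_selected set for a non-selected candidate is exactly B's dict entry
theorem connStep_eq_nbStep (selected : List Int) (columns : List (List Int)) (cand : Int)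
    (hcand : cand ∉ selected) (nb : PySem.Dict Int (PySem.Set Int)) (cs : PySem.Set Int) (fk : List Int)
    (hrel : cs = nb.getD cand PySem.Set.empty) :
    pvConnStep selected columns cand cs fk
      = (pvNbStep selected columns nb fk).getD cand PySem.Set.empty := by
  match fk with
  | [] => exact hrel
  | [a] => exact hrel
  | a :: b :: c :: t => exact hrel
  | [a, d] =>
    simp only [pvConnStep, pvNbStep]
    set st := pvTblT columns a with hst
    set dt := pvTblT columns d with hdt
    by_cases c1 : st ∈ selected ∧ dt ∉ selected
    · -- outer if true; inner (dt ∈ sel ∧ st ∉ sel) is false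
      have c2 : ¬ (dt ∈ selected ∧ st ∉ selected) := fun h => h.2 c1.1
      rw [if_pos c1, if_neg c2, PySem.Dict.getD_modify]
      by_cases hdc : dt = cand
      · have hnc1 : ¬ (st = cand ∧ dt ∈ selected) := fun h => hcand (h.1 ▸ c1.1)
        rw [if_neg hnc1, if_pos ⟨hdc, c1.1⟩, if_pos hdc.symm, hdc, ← hrel]
      · have hnc1 : ¬ (st = cand ∧ dt ∈ selected) := fun h => hcand (h.1 ▸ c1.1)
        have hnc2 : ¬ (dt = cand ∧ st ∈ selected) := fun h => hdc h.1
        rw [if_neg hnc1, if_neg hnc2, if_neg (fun h => hdc h.symm), ← hrel]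
    · by_cases c2 : dt ∈ selected ∧ st ∉ selected
      · rw [if_neg c1, if_pos c2, PySem.Dict.getD_modify]
        by_cases hsc : st = cand
        · rw [if_pos ⟨hsc, c2.1⟩, if_pos hsc.symm, hsc, ← hrel]
        · have hnc1 : ¬ (st = cand ∧ dt ∈ selected) := fun h => hsc h.1
          have hnc2 : ¬ (dt = cand ∧ st ∈ selected) := fun h => c2.2 h.2
          rw [if_neg hnc1, if_neg hnc2, if_neg (fun h => hsc h.symm), ← hrel]
      · rw [if_neg c1, if_neg c2]
        have hnc1 : ¬ (st = cand ∧ dt ∈ selected) := by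
          intro h
          exact c2 ⟨h.2, h.1 ▸ hcand⟩
        have hnc2 : ¬ (dt = cand ∧ st ∈ selected) := by
          intro h
          exact c1 ⟨h.2, h.1 ▸ hcand⟩
        rw [if_neg hnc1, if_neg hnc2, ← hrel]

theorem connT_nb_aux (selected : List Int) (columns : List (List Int)) (cand : Int)
    (hcand : cand ∉ selected) :
    ∀ (l : List (List Int)) (nb : PySem.Dict Int (PySem.Set Int)) (cs : PySem.Set Int),
      cs = nb.getD cand PySem.Set.empty →
      l.foldl (pvConnStep selected columns cand) cs
        = (l.foldl (pvNbStep selected columns) nb).getD cand PySem.Set.empty := by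
  intro l
  induction l with
  | nil => intro nb cs h; exact h
  | cons fk t ih =>
    intro nb cs h
    simp only [List.foldl_cons]
    exact ih (pvNbStep selected columns nb fk) _
      (connStep_eq_nbStep selected columns cand hcand nb cs fk h)

theorem connT_eq_nb (selected : List Int) (foreign_keys : List (List Int)) (columns : List (List Int)) (cand : Int)
    (hcand : cand ∉ selected) :
    pvConnT selected foreign_keys columns cand
      = (pvNbT selected foreign_keys columns).getD cand PySem.Set.empty := by
  exact connT_nb_aux selected columns cand hcand foreign_keys PySem.Dict.empty PySem.Set.empty
    (by simp [PySem.Dict.getD_empty])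

theorem getD_of_not_mem_keys (d : PySem.Dict Int (PySem.Set Int)) (c : Int)
    (h : c ∉ d.keys) : d.getD c PySem.Set.empty = [] := by
  have hc : d.contains c = false := by
    cases hc' : d.contains c
    · rfl
    · exact absurd ((PySem.Dict.contains_iff_mem_keys d c).1 hc') h
  exact PySem.Dict.getD_of_not_contains d _ hc

-- A's candidate loop
theorem loopA (p : Int -> Prop) [DecidablePred p] (S : List Int) :
    ∀ (l acc : List Int), (∀ x ∈ acc, x ∉ l) -> l.Nodup ->
      l.foldl (fun r c => if c ∈ r then r else if p c then PySem.Set.add r c else r) (S ++ acc)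
        = S ++ acc ++ l.filter (fun c => decide (c ∉ S) && decide (p c)) := by
  intro l
  induction l with
  | nil => intro acc _ _; simp
  | cons c t ih =>
    intro acc hdis hnd
    simp only [List.foldl_cons, List.filter_cons]
    by_cases hS : c ∈ S
    · rw [if_pos (by simp [hS] : c ∈ S ++ acc)]
      have hb : (decide (c ∉ S) && decide (p c)) = false := by simp [hS]
      rw [hb]
      exact ih acc (fun x hx hxt => hdis x hx (by simp [hxt])) hnd.of_cons
    · have hacc : c ∉ acc := fun h => hdis c h (by simp)
      have hmem : c ∉ S ++ acc := by simp [hS, hacc]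
      rw [if_neg hmem]
      by_cases hp : p c
      · rw [if_pos hp, PySem.Set.add_of_not_mem hmem]
        have he : (S ++ acc) ++ [c] = S ++ (acc ++ [c]) := by simp
        have hdis' : ∀ x ∈ acc ++ [c], x ∉ t := by
          intro x hx
          rcases List.mem_append.1 hx with hx' | hx'
          · exact fun ht => hdis x hx' (by simp [ht])
          · have : x = c := by simpa using hx'
            subst this
            exact (List.nodup_cons.1 hnd).1
        rw [he, ih (acc ++ [c]) hdis' hnd.of_cons]
        have hb : (decide (c ∉ S) && decide (p c)) = true := by simp [hS, hp]
        rw [hb]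
        simp
      · rw [if_neg hp]
        have hb : (decide (c ∉ S) && decide (p c)) = false := by simp [hp]
        rw [hb]
        exact ih acc (fun x hx hxt => hdis x hx (by simp [hxt])) hnd.of_cons

-- B's candidate loop
theorem loopB (p : Int -> Prop) [DecidablePred p] (S : List Int) :
    ∀ (l acc : List Int), (∀ x ∈ l, x ∉ S) -> (∀ x ∈ acc, x ∉ l) -> l.Nodup ->
      l.foldl (fun r c => if p c then PySem.Set.add r c else r) (S ++ acc)
        = S ++ acc ++ l.filter (fun c => decide (p c)) := by
  intro l
  induction l with
  | nil => intro acc _ _ _; simp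
  | cons c t ih =>
    intro acc hlS hdis hnd
    simp only [List.foldl_cons, List.filter_cons]
    have hS : c ∉ S := hlS c (by simp)
    have hacc : c ∉ acc := fun h => hdis c h (by simp)
    have hmem : c ∉ S ++ acc := by simp [hS, hacc]
    by_cases hp : p c
    · rw [if_pos hp, PySem.Set.add_of_not_mem hmem]
      have he : (S ++ acc) ++ [c] = S ++ (acc ++ [c]) := by simp
      have hdis' : ∀ x ∈ acc ++ [c], x ∉ t := by
        intro x hx
        rcases List.mem_append.1 hx with hx' | hx'
        · exact fun ht => hdis x hx' (by simp [ht])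
        · have : x = c := by simpa using hx'
          subst this
          exact (List.nodup_cons.1 hnd).1
      rw [he, ih (acc ++ [c]) (fun x hx => hlS x (by simp [hx])) hdis' hnd.of_cons]
      have hb : decide (p c) = true := by simp [hp]
      rw [hb]
      simp
    · rw [if_neg hp]
      have hb : decide (p c) = false := by simp [hp]
      rw [hb]
      exact ih acc (fun x hx => hlS x (by simp [hx])) (fun x hx hxt => hdis x hx (by simp [hxt])) hnd.of_cons

-- two strictly increasing integer lists with the same members are equal
theorem sorted_ext : ∀ (l1 l2 : List Int), l1.Pairwise (· < ·) -> l2.Pairwise (· < ·) ->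
    (∀ x, x ∈ l1 ↔ x ∈ l2) -> l1 = l2 := by
  intro l1
  induction l1 with
  | nil =>
    intro l2 _ _ hm
    cases l2 with
    | nil => rfl
    | cons b t2 => exact absurd ((hm b).2 (by simp)) (by simp)
  | cons a t ih =>
    intro l2 h1 h2 hm
    cases l2 with
    | nil => exact absurd ((hm a).1 (by simp)) (by simp)
    | cons b t2 =>
      have hab : a = b := by
        have ha2 : a ∈ b :: t2 := (hm a).1 (by simp)
        have hb1 : b ∈ a :: t := (hm b).2 (by simp)
        rcases List.mem_cons.1 ha2 with h | h
        · exact h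
        · have hba : b < a := (List.pairwise_cons.1 h2).1 a h
          rcases List.mem_cons.1 hb1 with h' | h'
          · exact h'.symm
          · have : a < b := (List.pairwise_cons.1 h1).1 b h'
            omega
      subst hab
      have htm : ∀ x, x ∈ t ↔ x ∈ t2 := by
        intro x
        constructor
        · intro hx
          have hax : a < x := (List.pairwise_cons.1 h1).1 x hx
          rcases List.mem_cons.1 ((hm x).1 (by simp [hx])) with h | h
          · omega
          · exact h
        · intro hx
          have hax : a < x := (List.pairwise_cons.1 h2).1 x hx
          rcases List.mem_cons.1 ((hm x).2 (by simp [hx])) with h | h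
          · omega
          · exact h
      rw [ih t2 (List.pairwise_cons.1 h1).2 (List.pairwise_cons.1 h2).2 htm]


-- ===== VERDICT (by name: the statement is the Claim_ definition above) =====
theorem add_bridge_tables_py_spec : Claim_equal_add_bridge_tables_py := by
  intro selected foreign_keys columns _ hpre
  unfold Spec_add_bridge_tables_py
  by_cases hlen : selected.length < 2
  · unfold add_bridge_tables_py add_bridge_tables_pyO add_bridge_tables_py_alt
    rw [if_pos hlen, if_pos hlen]
  · rcases hpre with h | ⟨hrows, hex, hfk⟩
    · exact absurd h hlen
    obtain ⟨nT, hnT⟩ := numB_some columns hrows hex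
    have hnTA : pvNumTablesA columns = some nT := by rw [numAB]; exact hnT
    have hnb := nbB_some selected foreign_keys columns hrows hfk
    have hA : add_bridge_tables_py selected foreign_keys columns
        = PySem.Set.ofList selected
            ++ (PySem.List.pyRange 0 nT 1).filter
                 (fun c => decide (c ∉ PySem.Set.ofList selected) &&
                           decide (2 ≤ (pvConnT selected foreign_keys columns c).length)) := by
      unfold add_bridge_tables_py add_bridge_tables_pyO
      rw [if_neg hlen]
      simp only [hnTA]
      rw [foldl_match_some _
            (fun result cand => if cand ∈ result then result
               else if 2 ≤ (pvConnT selected foreign_keys columns cand).length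
               then PySem.Set.add result cand else result)
            (PySem.List.pyRange 0 nT 1)
            (fun v x hx => by
              by_cases hv : x ∈ v
              · simp [hv]
              · simp only [connA_some selected foreign_keys columns x hrows hfk]
                simp [hv])
            (PySem.Set.ofList selected)]
      simp only [Option.getD_some]
      have hl := loopA (p := fun c => 2 ≤ (pvConnT selected foreign_keys columns c).length)
        (PySem.Set.ofList selected) (PySem.List.pyRange 0 nT 1) [] (by simp)
        (PySem.List.nodup_pyRange_one 0 nT)
      simpa using hl
    have hB : add_bridge_tables_py_alt selected foreign_keys columns
        = PySem.Set.ofList selected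
            ++ (PySem.List.sorted (pvNbT selected foreign_keys columns).keys (fun x => x) false).filter
                 (fun c => decide (0 ≤ c ∧ c < nT ∧
                     2 ≤ ((pvNbT selected foreign_keys columns).getD c PySem.Set.empty).length)) := by
      unfold add_bridge_tables_py_alt
      rw [if_neg hlen]
      simp only [hnT, hnb, Option.getD_some]
      have hks1 : ∀ x ∈ PySem.List.sorted (pvNbT selected foreign_keys columns).keys (fun x => x) false,
          x ∉ PySem.Set.ofList selected := by
        intro x hx hxS
        rw [PySem.List.mem_sorted] at hx
        exact nb_keys_not_selected selected foreign_keys columns x hx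
          ((PySem.Set.mem_ofList selected x).1 hxS)
      have hknd : (PySem.List.sorted (pvNbT selected foreign_keys columns).keys (fun x => x) false).Nodup :=
        ((PySem.List.sorted_perm _ _ _).nodup_iff).2 (nb_keys_nodup selected foreign_keys columns)
      have hl := loopB (p := fun c => 0 ≤ c ∧ c < nT ∧
          2 ≤ ((pvNbT selected foreign_keys columns).getD c PySem.Set.empty).length)
        (PySem.Set.ofList selected)
        (PySem.List.sorted (pvNbT selected foreign_keys columns).keys (fun x => x) false)
        [] hks1 (by simp) hknd
      simpa using hl
    rw [hA, hB]
    apply congrArg (PySem.Set.ofList selected ++ ·)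
    apply sorted_ext
    · exact (PySem.List.pairwise_lt_pyRange_one 0 nT).filter _
    · have hle : (PySem.List.sorted (pvNbT selected foreign_keys columns).keys (fun x => x) false).Pairwise (· ≤ ·) := by
        simpa using PySem.List.sorted_pairwise (pvNbT selected foreign_keys columns).keys (fun x => x)
      have hknd : (PySem.List.sorted (pvNbT selected foreign_keys columns).keys (fun x => x) false).Nodup :=
        ((PySem.List.sorted_perm _ _ _).nodup_iff).2 (nb_keys_nodup selected foreign_keys columns)
      have hlt : (PySem.List.sorted (pvNbT selected foreign_keys columns).keys (fun x => x) false).Pairwise (· < ·) :=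
        (hle.and hknd).imp (fun h => lt_of_le_of_ne h.1 h.2)
      exact hlt.filter _
    · intro x
      simp only [List.mem_filter, PySem.List.mem_pyRange_one, PySem.List.mem_sorted,
        Bool.and_eq_true, decide_eq_true_eq, PySem.Set.mem_ofList]
      constructor
      · rintro ⟨⟨hx0, hxn⟩, hxS, hcn⟩
        rw [connT_eq_nb selected foreign_keys columns x hxS] at hcn
        have hxk : x ∈ (pvNbT selected foreign_keys columns).keys := by
          by_contra hk
          rw [getD_of_not_mem_keys _ _ hk] at hcn
          simp at hcn
        exact ⟨hxk, hx0, hxn, hcn⟩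
      · rintro ⟨hxk, hx0, hxn, hcn⟩
        have hxS : x ∉ selected := nb_keys_not_selected selected foreign_keys columns x hxk
        rw [connT_eq_nb selected foreign_keys columns x hxS]
        exact ⟨⟨hx0, hxn⟩, hxS, hcn⟩
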